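-- pv_equiv track=rewrite | github.com/wiktoriakeller/cryptography-algorithms | shamir/shamir-secret.py | calculateShares
-- ===== SOURCE A (Python) =====
-- def calculateShares(sharesNum, prime, polynomial):
--     points = []
--     for i in range(1, sharesNum + 1):
--         pointValue = polynomial[0]
--         for j in range(len(polynomial) - 1, 0, -1):
--             pointValue += ((polynomial[j] * (i**(j))) % prime)
--             #pointValue = (polynomial[j] * pow(i, j, prime))
--         points.append([i, pointValue])
--     return points
-- ===== SOURCE B (Python) =====
-- def calculateShares(sharesNum, prime, polynomial):
--     shares = []
--     for i in range(1, sharesNum + 1):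
--         total = polynomial[0]
--         ipow = 1
--         for j in range(1, len(polynomial)):
--             ipow = ipow * i % prime
--             total += polynomial[j] * ipow % prime
--         shares.append([i, total])
--     return shares
-- ===== Notes on version B (the rewrite author's own statement) =====
-- stated objective: faster
-- what changed: B keeps one incremental modular power (ipow = ipow*i % prime), updated ascending per coefficient, instead of recomputing the full big-integer power i**j from scratch for every j in a descending loop.
import Mathlib
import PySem

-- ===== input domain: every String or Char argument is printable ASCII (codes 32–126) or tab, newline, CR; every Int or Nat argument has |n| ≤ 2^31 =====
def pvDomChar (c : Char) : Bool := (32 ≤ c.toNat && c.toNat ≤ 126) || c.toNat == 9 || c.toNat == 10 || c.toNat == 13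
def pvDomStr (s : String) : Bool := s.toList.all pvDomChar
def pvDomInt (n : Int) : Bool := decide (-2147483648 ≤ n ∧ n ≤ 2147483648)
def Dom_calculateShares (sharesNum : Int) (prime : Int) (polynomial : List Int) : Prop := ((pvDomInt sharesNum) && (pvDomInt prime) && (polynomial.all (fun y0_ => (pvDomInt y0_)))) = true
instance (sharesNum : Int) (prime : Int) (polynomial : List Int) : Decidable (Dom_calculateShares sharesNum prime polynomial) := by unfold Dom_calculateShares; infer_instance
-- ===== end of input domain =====

-- B replaces A's per-term big-integer power i**j (recomputed descending) by one incremental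
-- modular power carried ascending through the coefficients; objective: faster.

-- ===== PORT A =====
def calculateShares (sharesNum : Int) (prime : Int) (polynomial : List Int) : List (List Int) :=
  (PySem.List.pyRange 1 (sharesNum + 1) 1).foldl
    (fun points i =>
      let pointValue : Int :=
        (PySem.List.pyRange (PySem.List.len polynomial - 1) 0 (-1)).foldl
          (fun pv j =>
            pv + PySem.Int.mod (PySem.List.pyGetD polynomial j 0 * i ^ j.toNat) prime)
          (PySem.List.pyGetD polynomial 0 0)
      points ++ [[i, pointValue]])
    []

-- ===== PORT B =====
-- state = (ipow, total): ipow is the running modular power of i, total the running share value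
def bStep (prime i : Int) (polynomial : List Int) (st : Int × Int) (j : Int) : Int × Int :=
  let ipow := PySem.Int.mod (st.1 * i) prime
  (ipow, st.2 + PySem.Int.mod (PySem.List.pyGetD polynomial j 0 * ipow) prime)

def calculateShares_alt (sharesNum : Int) (prime : Int) (polynomial : List Int) : List (List Int) :=
  (PySem.List.pyRange 1 (sharesNum + 1) 1).foldl
    (fun shares i =>
      let st :=
        (PySem.List.pyRange 1 (PySem.List.len polynomial) 1).foldl
          (bStep prime i polynomial)
          (1, PySem.List.pyGetD polynomial 0 0)
      shares ++ [[i, st.2]])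
    []

-- ===== PRECONDITION & SPEC =====
-- Pre_ excludes exactly the inputs where A raises: with at least one share requested,
-- an empty polynomial (IndexError on polynomial[0]) and, when the inner loop runs
-- (degree ≥ 1), prime = 0 (ZeroDivisionError).
def Pre_calculateShares (sharesNum : Int) (prime : Int) (polynomial : List Int) : Prop :=
  sharesNum < 1 ∨ (polynomial ≠ [] ∧ ((polynomial.length : Int) ≤ 1 ∨ prime ≠ 0))
instance (sharesNum : Int) (prime : Int) (polynomial : List Int) : Decidable (Pre_calculateShares sharesNum prime polynomial) := by unfold Pre_calculateShares; infer_instance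

def pvWitness_calculateShares : Int × Int × List Int := (3, 7, [5, 2, 3])

def Spec_calculateShares (sharesNum : Int) (prime : Int) (polynomial : List Int) (out : List (List Int)) : Prop := out = calculateShares_alt sharesNum prime polynomial
instance (sharesNum : Int) (prime : Int) (polynomial : List Int) (out : List (List Int)) : Decidable (Spec_calculateShares sharesNum prime polynomial out) := by unfold Spec_calculateShares; infer_instance

-- ===== CLAIM (what is proved, stated in full; the proofs are below) =====
def Claim_equal_calculateShares : Prop := ∀ (sharesNum : Int) (prime : Int) (polynomial : List Int), Dom_calculateShares sharesNum prime polynomial → Pre_calculateShares sharesNum prime polynomial → Spec_calculateShares sharesNum prime polynomial (calculateShares sharesNum prime polynomial)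

-- ===== LEMMAS AND PROOFS =====

-- Python's % only depends on the argument's residue class modulo the divisor.
lemma pymod_eq_iff_dvd (p a b : Int) (hp : p ≠ 0) :
    PySem.Int.mod a p = PySem.Int.mod b p ↔ p ∣ (a - b) := by
  constructor
  · intro h
    have ha := PySem.Int.floordiv_mul_add_mod a p
    have hb := PySem.Int.floordiv_mul_add_mod b p
    exact ⟨PySem.Int.floordiv a p - PySem.Int.floordiv b p, by rw [h] at ha; nlinarith⟩
  · intro h
    have ha := PySem.Int.floordiv_mul_add_mod a p
    have hb := PySem.Int.floordiv_mul_add_mod b p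
    have hd : p ∣ (PySem.Int.mod a p - PySem.Int.mod b p) := by
      obtain ⟨k, hk⟩ := h
      exact ⟨k - PySem.Int.floordiv a p + PySem.Int.floordiv b p, by nlinarith⟩
    have hz : PySem.Int.mod a p - PySem.Int.mod b p = 0 := by
      apply Int.eq_zero_of_abs_lt_dvd ((abs_dvd p _).mpr hd)
      rcases lt_or_gt_of_ne hp with hneg | hpos
      · have h1 := PySem.Int.mod_neg_bounds a hneg
        have h2 := PySem.Int.mod_neg_bounds b hneg
        rw [abs_of_neg hneg, abs_lt]; omega
      · have h1 := PySem.Int.mod_nonneg a hpos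
        have h2 := PySem.Int.mod_lt a hpos
        have h3 := PySem.Int.mod_nonneg b hpos
        have h4 := PySem.Int.mod_lt b hpos
        rw [abs_of_pos hpos, abs_lt]; omega
    omega

lemma pymod_mod_self (p a : Int) (hp : p ≠ 0) :
    PySem.Int.mod (PySem.Int.mod a p) p = PySem.Int.mod a p := by
  rw [pymod_eq_iff_dvd _ _ _ hp]
  have := PySem.Int.floordiv_mul_add_mod a p
  exact ⟨-(PySem.Int.floordiv a p), by linarith⟩

-- B's inner loop: the running power stays congruent to i^m, the running total
-- accumulates exactly A's terms (in ascending order).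
lemma bfold (prime i c : Int) (polynomial : List Int) (hp : prime ≠ 0) : ∀ (m : Nat),
    ∃ s : Int, PySem.Int.mod s prime = PySem.Int.mod (i ^ m) prime ∧
      (PySem.List.pyRange 1 (1 + (m : Int)) 1).foldl (bStep prime i polynomial) (1, c)
      = (s, c + ((PySem.List.pyRange 1 (1 + (m : Int)) 1).map
            (fun j => PySem.Int.mod (PySem.List.pyGetD polynomial j 0 * i ^ j.toNat) prime)).sum) := by
  intro m
  induction m with
  | zero =>
    refine ⟨1, by norm_num, ?_⟩
    rw [PySem.List.pyRange_one_eq_nil (by norm_num)]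
    simp
  | succ m ih =>
    obtain ⟨s, hs, heq⟩ := ih
    have hcast : (1 + ((m + 1 : Nat) : Int)) = (1 + (m : Int)) + 1 := by push_cast; ring
    have hsplit := PySem.List.pyRange_one_succ_right (a := 1) (b := 1 + (m : Int)) (by omega)
    have hdvd_s : prime ∣ (s - i ^ m) := (pymod_eq_iff_dvd _ _ _ hp).mp hs
    have hdvd_pow : prime ∣ (PySem.Int.mod (s * i) prime - i ^ (m + 1)) := by
      have h1 : prime ∣ (PySem.Int.mod (s * i) prime - s * i) :=
        (pymod_eq_iff_dvd _ _ _ hp).mp (pymod_mod_self prime (s * i) hp)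
      have h2 : prime ∣ (s * i - i ^ (m + 1)) := by
        have : s * i - i ^ (m + 1) = (s - i ^ m) * i := by ring
        rw [this]; exact Dvd.dvd.mul_right hdvd_s i
      have := dvd_add h1 h2
      simpa using this
    refine ⟨PySem.Int.mod (s * i) prime, ?_, ?_⟩
    · exact (pymod_eq_iff_dvd _ _ _ hp).mpr hdvd_pow
    · rw [hcast, hsplit, List.foldl_append, heq, List.map_append, List.sum_append]
      have hterm : PySem.Int.mod (PySem.List.pyGetD polynomial (1 + (m : Int)) 0 *
            PySem.Int.mod (s * i) prime) prime
          = PySem.Int.mod (PySem.List.pyGetD polynomial (1 + (m : Int)) 0 *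
            i ^ ((1 + (m : Int)).toNat)) prime := by
        have htn : ((1 + (m : Int)).toNat) = m + 1 := by omega
        rw [htn, pymod_eq_iff_dvd _ _ _ hp]
        have : PySem.List.pyGetD polynomial (1 + (m : Int)) 0 * PySem.Int.mod (s * i) prime -
            PySem.List.pyGetD polynomial (1 + (m : Int)) 0 * i ^ (m + 1)
            = PySem.List.pyGetD polynomial (1 + (m : Int)) 0 *
              (PySem.Int.mod (s * i) prime - i ^ (m + 1)) := by ring
        rw [this]
        exact Dvd.dvd.mul_left hdvd_pow _
      simp [bStep, hterm]
      ring

-- Per-share equality of the two inner loops.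
lemma inner_eq (prime i : Int) (polynomial : List Int)
    (h : (polynomial.length : Int) ≤ 1 ∨ prime ≠ 0) :
    (PySem.List.pyRange (PySem.List.len polynomial - 1) 0 (-1)).foldl
      (fun pv j => pv + PySem.Int.mod (PySem.List.pyGetD polynomial j 0 * i ^ j.toNat) prime)
      (PySem.List.pyGetD polynomial 0 0)
    = ((PySem.List.pyRange 1 (PySem.List.len polynomial) 1).foldl
        (bStep prime i polynomial) (1, PySem.List.pyGetD polynomial 0 0)).2 := by
  rcases h with hlen | hp
  · -- degree 0 (or empty): both inner loops are empty
    rw [PySem.List.pyRange_one_eq_nil (by simp [PySem.List.len]; omega),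
        PySem.List.pyRange_neg_one_eq_nil (by simp [PySem.List.len]; omega)]
    simp
  · rcases Nat.eq_zero_or_pos polynomial.length with h0 | hpos
    · rw [PySem.List.pyRange_one_eq_nil (by simp [PySem.List.len, h0]),
          PySem.List.pyRange_neg_one_eq_nil (by simp [PySem.List.len, h0])]
      simp
    · obtain ⟨m, hm⟩ : ∃ m : Nat, polynomial.length = m + 1 :=
        ⟨polynomial.length - 1, by omega⟩
      have hlenInt : PySem.List.len polynomial = 1 + (m : Int) := by
        simp [PySem.List.len, hm]; ring
      obtain ⟨s, _, heq⟩ := bfold prime i (PySem.List.pyGetD polynomial 0 0) polynomial hp m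
      rw [hlenInt, heq,
          PySem.List.foldl_add,
          show (1 + (m : Int)) - 1 = (0 : Int) + (m : Int) by ring,
          PySem.List.pyRange_neg_one_eq_reverse,
          show ((0 : Int) + 1) = (1 : Int) by ring,
          show ((0 : Int) + (m : Int) + 1) = 1 + (m : Int) by ring,
          List.map_reverse, List.sum_reverse]

-- ===== VERDICT (by name: the statement is the Claim_ definition above) =====
theorem calculateShares_spec : Claim_equal_calculateShares := by
  intro sharesNum prime polynomial _ hpre
  unfold Spec_calculateShares calculateShares calculateShares_alt
  rcases hpre with hlt | ⟨_, h⟩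
  · rw [PySem.List.pyRange_one_eq_nil (by omega)]
    rfl
  · rw [PySem.List.foldl_append_singleton_eq_map, PySem.List.foldl_append_singleton_eq_map]
    simp only [List.nil_append]
    apply List.map_congr_left
    intro i _
    rw [inner_eq prime i polynomial h]
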